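-- pv_equiv track=rewrite | github.com/FilipRyszardRysz/Python | TD/lab-4/zad1.py | asciitobin
-- ===== SOURCE A (Python) =====
-- def asciitobin(text):
--     tablica = []
--     for i in range(len(text)):
--         z = ord(text[i])
--         while z:
--             tablica.append(z & 1)
--             z >>= 1
--     tablica.reverse()
--     return tablica
-- ===== SOURCE B (Python) =====
-- def asciitobin(text):
--     out = []
--     for c in reversed(text):
--         z = ord(c)
--         for k in reversed(range(z.bit_length())):
--             out.append((z >> k) & 1)
--     return out
-- ===== Notes on version B (the rewrite author's own statement) =====
-- stated objective: alternative
-- what changed: B iterates the characters in reverse and emits each character's bits MSB-first via bit_length and shifts, eliminating A's per-bit while loop with LSB-first appends followed by a whole-list reverse.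
import Mathlib
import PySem

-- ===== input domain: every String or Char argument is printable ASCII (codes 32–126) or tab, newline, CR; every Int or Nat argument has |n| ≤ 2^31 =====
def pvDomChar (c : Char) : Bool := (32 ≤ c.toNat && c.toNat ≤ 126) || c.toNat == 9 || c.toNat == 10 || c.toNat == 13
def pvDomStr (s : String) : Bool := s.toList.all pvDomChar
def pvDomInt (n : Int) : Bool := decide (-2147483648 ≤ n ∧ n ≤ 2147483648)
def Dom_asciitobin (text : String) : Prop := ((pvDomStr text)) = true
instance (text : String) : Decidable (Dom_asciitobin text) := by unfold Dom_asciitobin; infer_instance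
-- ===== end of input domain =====

-- B iterates the characters in reverse and emits each character's bits MSB-first (bit_length + shifts),
-- replacing A's LSB-first while loop followed by a whole-list reverse; same cost, different decomposition.


-- ===== PORT A =====
-- the `while z:` loop: append z & 1, then z >>= 1
def pvLsbBits (z : Nat) : List Int :=
  if z = 0 then [] else ((z % 2 : Nat) : Int) :: pvLsbBits (z / 2)
decreasing_by exact Nat.div_lt_self (Nat.pos_of_ne_zero (by assumption)) (by omega)

def asciitobin (text : String) : List Int :=
  (text.toList.foldl (fun tablica c => tablica ++ pvLsbBits c.toNat) []).reverse

-- ===== PORT B =====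
-- `for k in reversed(range(z.bit_length())): out.append((z >> k) & 1)`  (bit_length = Nat.size)
def asciitobin_alt (text : String) : List Int :=
  text.toList.reverse.foldl
    (fun out c =>
      out ++ (List.range (Nat.size c.toNat)).reverse.map (fun k => (((c.toNat >>> k) % 2 : Nat) : Int)))
    []

-- ===== PRECONDITION & SPEC =====
def Spec_asciitobin (text : String) (out : List Int) : Prop := out = asciitobin_alt text
instance (text : String) (out : List Int) : Decidable (Spec_asciitobin text out) := by unfold Spec_asciitobin; infer_instance

-- ===== CLAIM (what is proved, stated in full; the proofs are below) =====
def Claim_equal_asciitobin : Prop := ∀ (text : String), Dom_asciitobin text → Spec_asciitobin text (asciitobin text)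

-- ===== LEMMAS AND PROOFS =====

-- size z = size (z / 2) + 1 for z ≠ 0 (needed by the port-A while-loop characterisation)
theorem pv_size_div_two {z : Nat} (hz : z ≠ 0) : Nat.size z = Nat.size (z / 2) + 1 := by
  conv_lhs => rw [← Nat.bit_testBit_zero_shiftRight_one z]
  rw [Nat.size_bit (by rw [Nat.bit_testBit_zero_shiftRight_one]; exact hz)]
  simp [Nat.shiftRight_succ, Nat.shiftRight_zero]

-- A's while loop lists exactly the bits at positions 0 .. size z - 1, LSB first.
theorem pvLsbBits_eq_range (z : Nat) :
    pvLsbBits z = (List.range (Nat.size z)).map (fun k => (((z >>> k) % 2 : Nat) : Int)) := by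
  induction z using Nat.strong_induction_on with
  | _ z ih =>
    rw [pvLsbBits]
    by_cases hz : z = 0
    · simp [hz]
    · rw [if_neg hz, ih (z / 2) (Nat.div_lt_self (Nat.pos_of_ne_zero hz) (by omega)),
        pv_size_div_two hz, List.range_succ_eq_map]
      simp only [List.map_cons, List.map_map, Nat.shiftRight_eq_div_pow, pow_zero, Nat.div_one]
      refine congrArg (_ :: ·) (List.map_congr_left fun a _ => ?_)
      simp only [Function.comp_apply, Nat.succ_eq_add_one]
      rw [Nat.div_div_eq_div_mul, ← pow_succ']

theorem foldl_append_eq_flatMap' {α β : Type} (f : α → List β) (xs : List α) (acc : List β) :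
    xs.foldl (fun a x => a ++ f x) acc = acc ++ xs.flatMap f := by
  induction xs generalizing acc with
  | nil => simp
  | cons x xs ih => simp [List.foldl_cons, ih, List.flatMap_cons]

-- ===== VERDICT (by name: the statement is the Claim_ definition above) =====
theorem asciitobin_spec : Claim_equal_asciitobin := by
  intro text _
  unfold Spec_asciitobin asciitobin asciitobin_alt
  rw [foldl_append_eq_flatMap', foldl_append_eq_flatMap']
  simp only [List.nil_append, List.reverse_flatMap]
  congr 1
  funext c
  simp only [Function.comp_apply, pvLsbBits_eq_range, List.map_reverse]
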